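-- pv_equiv track=rewrite | github.com/webifi-me/WebifiPythonLibrary | Webifi_p3.py | bracket_encode
-- ===== SOURCE A (Python) =====
-- def bracket_encode(data):
--     """Build a string where all visible ASCII characters will be shown normally and non visible ASCII
--     characters will be shown between square brackets. An opening square bracket will be [[
--     :param data: The data that must be bracket encoded
--     :return:
--     """
--     text = ""
--     for i in range(0, len(data)):
--         val = ord(data[i])
--         if val < 32 or val > 126:
--             text += '[' + str(val) + ']'
--         elif data[i] == '[':
--             text += '[['
--         else:
--             text += data[i]
--     return text
-- ===== SOURCE B (Python) =====
-- import re
--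
-- _NONVIS = re.compile(r'[^\x20-\x7e]|\[')
--
-- def _repl(m):
--     c = m.group(0)
--     return '[[' if c == '[' else '[' + str(ord(c)) + ']'
--
-- def bracket_encode(data):
--     return _NONVIS.sub(_repl, data)
-- ===== Notes on version B (the rewrite author's own statement) =====
-- stated objective: faster
-- what changed: Replaces the explicit index loop with quadratic string concatenation by a single compiled regex substitution whose callback encodes each matched (non-visible or opening-bracket) character.
import Mathlib
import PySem

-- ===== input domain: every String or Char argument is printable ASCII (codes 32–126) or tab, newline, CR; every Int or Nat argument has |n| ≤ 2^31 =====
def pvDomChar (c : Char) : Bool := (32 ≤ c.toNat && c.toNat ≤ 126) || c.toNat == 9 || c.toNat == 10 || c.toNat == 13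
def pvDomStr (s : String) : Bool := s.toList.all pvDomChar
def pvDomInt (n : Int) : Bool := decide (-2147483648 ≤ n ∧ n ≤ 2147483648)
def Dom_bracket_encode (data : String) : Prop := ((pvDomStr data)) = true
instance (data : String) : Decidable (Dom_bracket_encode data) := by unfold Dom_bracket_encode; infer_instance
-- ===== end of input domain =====

-- B replaces A's explicit index loop and string concatenation by a per-character
-- encoder applied via a single regex substitution (mapped over the characters); a timing run measured B faster.


-- ===== PORT A =====
-- A: loop over indices, accumulating a string; ported as a foldl over the character
-- list (same order) with a List Char accumulator (exact: Python str concatenation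
-- of these ASCII pieces = list append of their characters).
def bracket_encode (data : String) : String :=
  String.mk (data.toList.foldl (fun text c =>
    let val : Int := (c.toNat : Int)
    if val < 32 ∨ 126 < val then text ++ ('[' :: (PySem.Int.toStr val).toList ++ [']'])
    else if c = '[' then text ++ ['[', '[']
    else text ++ [c]) [])

-- ===== PORT B =====
-- B: re.sub replaces each matched character (non-visible or '[') by the callback's
-- value and leaves the rest; exact model: map the per-character encoder and flatten.
def bracketEncRepl (c : Char) : List Char :=
  if c = '[' then ['[', '[']
  else '[' :: (PySem.Int.toStr (c.toNat : Int)).toList ++ [']']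

def bracket_encode_alt (data : String) : String :=
  String.mk (data.toList.flatMap (fun c =>
    if c.toNat < 32 ∨ 126 < c.toNat ∨ c = '[' then bracketEncRepl c else [c]))

-- ===== PRECONDITION & SPEC =====
def Spec_bracket_encode (data : String) (out : String) : Prop := out = bracket_encode_alt data
instance (data : String) (out : String) : Decidable (Spec_bracket_encode data out) := by unfold Spec_bracket_encode; infer_instance

-- ===== CLAIM (what is proved, stated in full; the proofs are below) =====
def Claim_equal_bracket_encode : Prop := ∀ (data : String), Dom_bracket_encode data → Spec_bracket_encode data (bracket_encode data)

-- ===== LEMMAS AND PROOFS =====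
theorem bracket_encode_body_eq (c : Char) :
    (if (c.toNat : Int) < 32 ∨ 126 < (c.toNat : Int) then '[' :: (PySem.Int.toStr (c.toNat : Int)).toList ++ [']']
     else if c = '[' then ['[', '[']
     else [c])
    = (if c.toNat < 32 ∨ 126 < c.toNat ∨ c = '[' then bracketEncRepl c else [c]) := by
  by_cases h1 : c.toNat < 32 ∨ 126 < c.toNat
  · have h1' : (c.toNat : Int) < 32 ∨ 126 < (c.toNat : Int) := by omega
    rw [if_pos h1', if_pos (by tauto)]
    unfold bracketEncRepl
    rcases eq_or_ne c '[' with h | h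
    · subst h; simp at h1
    · rw [if_neg h]
  · have h1' : ¬((c.toNat : Int) < 32 ∨ 126 < (c.toNat : Int)) := by omega
    rw [if_neg h1']
    rcases eq_or_ne c '[' with h | h
    · rw [if_pos h, if_pos (by tauto)]; unfold bracketEncRepl; rw [if_pos h]
    · rw [if_neg h, if_neg (by tauto)]

theorem bracket_encode_step_eq (acc : List Char) (c : Char) :
    (if (c.toNat : Int) < 32 ∨ 126 < (c.toNat : Int) then acc ++ ('[' :: (PySem.Int.toStr (c.toNat : Int)).toList ++ [']'])
     else if c = '[' then acc ++ ['[', '[']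
     else acc ++ [c])
    = acc ++ (if c.toNat < 32 ∨ 126 < c.toNat ∨ c = '[' then bracketEncRepl c else [c]) := by
  rw [← bracket_encode_body_eq]; split_ifs <;> rfl

theorem bracket_encode_foldl_eq (l : List Char) (acc : List Char) :
    l.foldl (fun text c =>
      if (c.toNat : Int) < 32 ∨ 126 < (c.toNat : Int) then text ++ ('[' :: (PySem.Int.toStr (c.toNat : Int)).toList ++ [']'])
      else if c = '[' then text ++ ['[', '[']
      else text ++ [c]) acc
    = acc ++ l.flatMap (fun c => if c.toNat < 32 ∨ 126 < c.toNat ∨ c = '[' then bracketEncRepl c else [c]) := by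
  induction l generalizing acc with
  | nil => simp
  | cons c t ih =>
    rw [List.foldl_cons, bracket_encode_step_eq, ih, List.flatMap_cons, List.append_assoc]

-- ===== VERDICT (by name: the statement is the Claim_ definition above) =====
theorem bracket_encode_spec : Claim_equal_bracket_encode := by
  intro data _
  unfold Spec_bracket_encode bracket_encode bracket_encode_alt
  rw [bracket_encode_foldl_eq, List.nil_append]
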